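-- pv_equiv track=rewrite | github.com/bymars/topcoder | srm686/BracketSequenceDiv2.py | count
-- ===== SOURCE A (Python) =====
-- modulo = 1000000007
--
-- def add(a, b):
--     a += b
--     if a >= modulo:
--         a -= modulo
--     return a
--
-- def count(s):
--     n = len(s)
--     dp = [0] * (n + 2)
--     for i in range(len(dp)):
--         dp[i] = [0] * 2
--
--     dp[0][0] = 1
--     for i in range(len(s)):
--         if s[i] == '(':
--             for j in range(1, len(dp))[::-1]:
--                 dp[j][0] = add(dp[j-1][0], dp[j-1][1])
--         if s[i] == ')':
--             for j in range(0, len(dp) - 1):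
--                 dp[j][1] = add(dp[j+1][0], dp[j+1][1])
--     return dp[0][1]
-- ===== SOURCE B (Python) =====
-- modulo = 1000000007
--
-- def count(s):
--     # Counts distinct balanced bracket subsequence strings, like A, but with a
--     # single balance-indexed count array and the classic distinct-subsequence
--     # inclusion-exclusion (subtract the snapshot taken at the previous bracket
--     # of the same kind) instead of A's two-state overwrite representation.
--     n = len(s)
--     dp = [0] * (n + 2)
--     dp[0] = 1
--     last_open = [0] * (n + 2)
--     last_close = [0] * (n + 2)
--     for c in s:
--         if c == '(':
--             snap = dp[:]
--             for j in range(n + 1, 0, -1):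
--                 dp[j] = (dp[j] + dp[j - 1] - last_open[j - 1]) % modulo
--             last_open = snap
--         elif c == ')':
--             snap = dp[:]
--             for j in range(0, n + 1):
--                 dp[j] = (dp[j] + dp[j + 1] - last_close[j + 1]) % modulo
--             last_close = snap
--     return (dp[0] - 1) % modulo
-- ===== Notes on version B (the rewrite author's own statement) =====
-- stated objective: alternative
-- what changed: Replaces A's two-counter-per-balance overwrite DP (separate counts for subsequences ending in an opening vs a closing bracket, rebuilt wholesale on each character) with a single balance-indexed array of total counts updated by the classic distinct-subsequence inclusion-exclusion: add the shifted column and subtract the snapshot saved at the previous occurrence of the same bracket kind, finally removing the empty subsequence with (dp[0]-1) % modulo.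
import Mathlib
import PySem

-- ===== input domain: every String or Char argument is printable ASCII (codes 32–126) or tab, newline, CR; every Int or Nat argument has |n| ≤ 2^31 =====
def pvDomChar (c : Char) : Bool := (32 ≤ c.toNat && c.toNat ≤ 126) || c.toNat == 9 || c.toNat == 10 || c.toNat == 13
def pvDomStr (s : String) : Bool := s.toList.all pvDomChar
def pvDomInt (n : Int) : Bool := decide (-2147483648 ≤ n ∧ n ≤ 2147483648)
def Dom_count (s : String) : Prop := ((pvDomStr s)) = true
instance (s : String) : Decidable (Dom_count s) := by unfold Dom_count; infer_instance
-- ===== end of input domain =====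

-- B replaces A's two-state overwrite DP by a single balance-count array with
-- inclusion-exclusion snapshots at the previous same bracket (alternative algorithm, same result).


-- ===== PORT A =====
def pvModulo : Int := 1000000007

-- port of A's helper `add`
def pvAdd (a b : Int) : Int :=
  let a := a + b
  if a ≥ pvModulo then a - pvModulo else a

-- the body of A's outer loop for one character (dp rows are pairs: dp[j][0] = .1, dp[j][1] = .2)
def pvStepA (n : Nat) (dp : List (Int × Int)) (c : Char) : List (Int × Int) :=
  let dp := if c = '(' then
      ((PySem.List.slice? (PySem.List.pyRange 1 ((n : Int) + 2) 1) none none (-1)).getD []).foldl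
        (fun dp j =>
          PySem.List.pySetD dp j
            (pvAdd (PySem.List.pyGetD dp (j - 1) (0, 0)).1 (PySem.List.pyGetD dp (j - 1) (0, 0)).2,
             (PySem.List.pyGetD dp j (0, 0)).2)) dp
    else dp
  let dp := if c = ')' then
      (PySem.List.pyRange 0 ((n : Int) + 1) 1).foldl
        (fun dp j =>
          PySem.List.pySetD dp j
            ((PySem.List.pyGetD dp j (0, 0)).1,
             pvAdd (PySem.List.pyGetD dp (j + 1) (0, 0)).1 (PySem.List.pyGetD dp (j + 1) (0, 0)).2)) dp
    else dp
  dp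

-- literal port of A; the init loop `for i in range(len(dp)): dp[i] = [0]*2` builds the replicate of (0,0) rows
def count (s : String) : Int :=
  let cs := s.toList
  let n := cs.length
  let dp0 : List (Int × Int) := List.replicate (n + 2) ((0 : Int), (0 : Int))
  let dp0 := PySem.List.pySetD dp0 0 (1, 0)   -- dp[0][0] = 1
  let dp := (PySem.List.pyRange 0 (n : Int) 1).foldl
    (fun dp i => pvStepA n dp (PySem.List.pyGetD cs i ' ')) dp0
  (PySem.List.pyGetD dp 0 ((0 : Int), (0 : Int))).2

-- ===== PORT B =====
-- the body of Source B's loop for one character; state is (dp, last_open, last_close)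
def pvStepB (n : Nat) (st : List Int × List Int × List Int) (c : Char) :
    List Int × List Int × List Int :=
  if c = '(' then
    let snap := st.1
    let dp := (PySem.List.pyRange ((n : Int) + 1) 0 (-1)).foldl
      (fun dp j => PySem.List.pySetD dp j
        (PySem.Int.mod (PySem.List.pyGetD dp j 0 + PySem.List.pyGetD dp (j - 1) 0
            - PySem.List.pyGetD st.2.1 (j - 1) 0) pvModulo)) st.1
    (dp, snap, st.2.2)
  else if c = ')' then
    let snap := st.1
    let dp := (PySem.List.pyRange 0 ((n : Int) + 1) 1).foldl
      (fun dp j => PySem.List.pySetD dp j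
        (PySem.Int.mod (PySem.List.pyGetD dp j 0 + PySem.List.pyGetD dp (j + 1) 0
            - PySem.List.pyGetD st.2.2 (j + 1) 0) pvModulo)) st.1
    (dp, st.2.1, snap)
  else st

-- literal port of Source B
def count_alt (s : String) : Int :=
  let n := s.toList.length
  let st := s.toList.foldl (pvStepB n)
    (PySem.List.pySetD (List.replicate (n + 2) (0 : Int)) 0 1,
     List.replicate (n + 2) (0 : Int), List.replicate (n + 2) (0 : Int))
  PySem.Int.mod (PySem.List.pyGetD st.1 0 0 - 1) pvModulo

-- ===== PRECONDITION & SPEC =====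
def Spec_count (s : String) (out : Int) : Prop := out = count_alt s
instance (s : String) (out : Int) : Decidable (Spec_count s out) := by unfold Spec_count; infer_instance

-- ===== CLAIM (what is proved, stated in full; the proofs are below) =====
def Claim_equal_count : Prop := ∀ (s : String), Dom_count s → Spec_count s (count s)

-- ===== LEMMAS AND PROOFS =====

lemma pv_getD_set {α : Type} (L : List α) (i k : Nat) (v d : α) :
    (L.set i v).getD k d = if i = k ∧ i < L.length then v else L.getD k d := by
  simp only [List.getD_eq_getElem?_getD, List.getElem?_set]
  split_ifs with h1 h2 h3 <;> simp_all
  omega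

lemma pv_getD_replicate {α : Type} (n k : Nat) (x : α) : (List.replicate n x).getD k x = x := by
  simp only [List.getD_eq_getElem?_getD, List.getElem?_replicate]
  split <;> simp

lemma pv_descend {α : Type} (G : Int → α → α → α) (d : α) :
    ∀ (m : Nat) (L : List α), m < L.length → ∀ k : Nat,
      ((PySem.List.pyRange (m : Int) 0 (-1)).foldl
        (fun dp j => PySem.List.pySetD dp j
          (G j (PySem.List.pyGetD dp (j - 1) d) (PySem.List.pyGetD dp j d))) L).getD k d
      = if 1 ≤ k ∧ k ≤ m then G (k : Int) (L.getD (k - 1) d) (L.getD k d) else L.getD k d := by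
  intro m
  induction m with
  | zero =>
    intro L _ k
    rw [PySem.List.pyRange_neg_one_eq_nil (by omega)]
    rw [List.foldl_nil, if_neg (by omega)]
  | succ m ih =>
    intro L hm k
    have hcast : ((m + 1 : Nat) : Int) = (m : Int) + 1 := by push_cast; ring
    rw [hcast, PySem.List.pyRange_neg_one_cons (by omega)]
    simp only [List.foldl_cons]
    have e1 : ((m : Int) + 1 - 1) = (m : Int) := by ring
    rw [e1]
    set L' := PySem.List.pySetD L ((m : Int) + 1)
      (G ((m : Int) + 1) (PySem.List.pyGetD L (m : Int) d) (PySem.List.pyGetD L ((m : Int) + 1) d)) with hL'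
    have hL'eq : L' = L.set (m + 1)
        (G (((m + 1 : Nat)) : Int) (L.getD m d) (L.getD (m + 1) d)) := by
      rw [hL', show ((m : Int) + 1) = ((m + 1 : Nat) : Int) from by push_cast; ring,
        PySem.List.pySetD_natCast]
      simp only [PySem.List.pyGetD_natCast]
    have hlen : L'.length = L.length := by rw [hL'eq]; simp
    rw [ih L' (by omega) k]
    by_cases h1 : 1 ≤ k ∧ k ≤ m
    · rw [if_pos h1, if_pos (show 1 ≤ k ∧ k ≤ m + 1 by omega), hL'eq,
        pv_getD_set, pv_getD_set, if_neg (fun h => by omega), if_neg (fun h => by omega)]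
    · by_cases h2 : k = m + 1
      · subst h2
        rw [if_neg h1, if_pos (show 1 ≤ m + 1 ∧ m + 1 ≤ m + 1 by omega), hL'eq,
          pv_getD_set, if_pos ⟨rfl, by omega⟩]
        norm_num
      · rw [if_neg h1, if_neg (show ¬(1 ≤ k ∧ k ≤ m + 1) by omega), hL'eq,
          pv_getD_set, if_neg (fun h => by omega)]

lemma pv_foldl_set_length {α : Type} (F : List α → Int → α) :
    ∀ (js : List Int) (L : List α),
      (js.foldl (fun dp j => PySem.List.pySetD dp j (F dp j)) L).length = L.length := by
  intro js
  induction js with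
  | nil => intro L; rfl
  | cons j js ih => intro L; simp [List.foldl_cons, ih, PySem.List.length_pySetD]

lemma pv_ascend {α : Type} (G : Int → α → α → α) (d : α) :
    ∀ (m : Nat) (L : List α), m ≤ L.length → ∀ k : Nat,
      ((PySem.List.pyRange 0 (m : Int) 1).foldl
        (fun dp j => PySem.List.pySetD dp j
          (G j (PySem.List.pyGetD dp (j + 1) d) (PySem.List.pyGetD dp j d))) L).getD k d
      = if k < m then G (k : Int) (L.getD (k + 1) d) (L.getD k d) else L.getD k d := by
  intro m
  induction m with
  | zero =>
    intro L _ k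
    rw [PySem.List.pyRange_one_eq_nil (by omega)]
    rw [List.foldl_nil, if_neg (by omega)]
  | succ m ih =>
    intro L hm k
    have hcast : ((m + 1 : Nat) : Int) = (m : Int) + 1 := by push_cast; ring
    rw [hcast, PySem.List.pyRange_one_succ_right (by omega)]
    rw [List.foldl_append, List.foldl_cons, List.foldl_nil]
    set r := (PySem.List.pyRange 0 (m : Int) 1).foldl
      (fun dp j => PySem.List.pySetD dp j
        (G j (PySem.List.pyGetD dp (j + 1) d) (PySem.List.pyGetD dp j d))) L with hr
    have hrlen : r.length = L.length := by
      rw [hr]; exact pv_foldl_set_length _ _ _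
    have hrget : ∀ k : Nat, r.getD k d
        = if k < m then G (k : Int) (L.getD (k + 1) d) (L.getD k d) else L.getD k d :=
      ih L (by omega)
    have hread1 : PySem.List.pyGetD r ((m : Int) + 1) d = L.getD (m + 1) d := by
      rw [show ((m : Int) + 1) = ((m + 1 : Nat) : Int) from by push_cast; ring,
        PySem.List.pyGetD_natCast, hrget, if_neg (by omega)]
    have hread0 : PySem.List.pyGetD r (m : Int) d = L.getD m d := by
      rw [PySem.List.pyGetD_natCast, hrget, if_neg (by omega)]
    rw [hread1, hread0, show PySem.List.pySetD r (m : Int)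
        (G (m : Int) (L.getD (m + 1) d) (L.getD m d))
      = r.set m (G (m : Int) (L.getD (m + 1) d) (L.getD m d)) from PySem.List.pySetD_natCast .. ,
      pv_getD_set]
    by_cases h2 : k = m
    · subst h2
      rw [if_pos ⟨rfl, by omega⟩, if_pos (by omega)]
    · rw [if_neg (fun h => by omega), hrget]
      by_cases h3 : k < m
      · rw [if_pos h3, if_pos (by omega)]
      · rw [if_neg h3, if_neg (by omega)]

lemma pv_slice_rev (n : Nat) :
    ((PySem.List.slice? (PySem.List.pyRange 1 ((n : Int) + 2) 1) none none (-1)).getD [])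
      = PySem.List.pyRange ((n : Int) + 1) 0 (-1) := by
  rw [PySem.List.slice?_none_none_neg_one, Option.getD_some, PySem.List.pyRange_neg_one_eq_reverse]
  norm_num
  congr 1

lemma pvStepA_open (n : Nat) (A : List (Int × Int)) (h : n + 2 ≤ A.length) (k : Nat) :
    (pvStepA n A '(').getD k (0, 0) =
      if 1 ≤ k ∧ k ≤ n + 1 then
        (pvAdd (A.getD (k - 1) (0, 0)).1 (A.getD (k - 1) (0, 0)).2, (A.getD k (0, 0)).2)
      else A.getD k (0, 0) := by
  simp only [pvStepA, reduceIte, pv_slice_rev]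
  have := pv_descend (fun j x y => (pvAdd x.1 x.2, y.2)) ((0, 0) : Int × Int) (n + 1) A
    (by omega) k
  rw [show (((n + 1 : Nat)) : Int) = (n : Int) + 1 from by push_cast; ring] at this
  exact this

lemma pvStepA_close (n : Nat) (A : List (Int × Int)) (h : n + 2 ≤ A.length) (k : Nat) :
    (pvStepA n A ')').getD k (0, 0) =
      if k < n + 1 then
        ((A.getD k (0, 0)).1, pvAdd (A.getD (k + 1) (0, 0)).1 (A.getD (k + 1) (0, 0)).2)
      else A.getD k (0, 0) := by
  simp only [pvStepA, reduceIte]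
  have := pv_ascend (fun j x y => (y.1, pvAdd x.1 x.2)) ((0, 0) : Int × Int) (n + 1) A
    (by omega) k
  rw [show (((n + 1 : Nat)) : Int) = (n : Int) + 1 from by push_cast; ring] at this
  exact this

lemma pvStepA_other (n : Nat) (A : List (Int × Int)) (c : Char)
    (h1 : c ≠ '(') (h2 : c ≠ ')') : pvStepA n A c = A := by
  simp only [pvStepA, if_neg h1, if_neg h2]

lemma pvStepA_length (n : Nat) (A : List (Int × Int)) (c : Char) :
    (pvStepA n A c).length = A.length := by
  simp only [pvStepA]
  split_ifs <;>
    simp only [pv_foldl_set_length (fun dp j =>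
        (pvAdd (PySem.List.pyGetD dp (j - 1) ((0:Int), (0:Int))).1 (PySem.List.pyGetD dp (j - 1) (0, 0)).2,
         (PySem.List.pyGetD dp j (0, 0)).2)),
      pv_foldl_set_length (fun dp j =>
        ((PySem.List.pyGetD dp j ((0:Int), (0:Int))).1,
         pvAdd (PySem.List.pyGetD dp (j + 1) (0, 0)).1 (PySem.List.pyGetD dp (j + 1) (0, 0)).2))]

lemma pvStepB_open_getD (n : Nat) (B lo lc : List Int) (h : n + 2 ≤ B.length) (k : Nat) :
    (pvStepB n (B, lo, lc) '(').1.getD k 0 =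
      if 1 ≤ k ∧ k ≤ n + 1 then
        PySem.Int.mod (B.getD k 0 + B.getD (k - 1) 0
          - PySem.List.pyGetD lo ((k : Int) - 1) 0) pvModulo
      else B.getD k 0 := by
  simp only [pvStepB, reduceIte]
  have := pv_descend (fun j x y =>
      PySem.Int.mod (y + x - PySem.List.pyGetD lo (j - 1) 0) pvModulo) (0 : Int) (n + 1) B
    (by omega) k
  rw [show (((n + 1 : Nat)) : Int) = (n : Int) + 1 from by push_cast; ring] at this
  exact this

lemma pvStepB_close_getD (n : Nat) (B lo lc : List Int) (h : n + 2 ≤ B.length) (k : Nat) :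
    (pvStepB n (B, lo, lc) ')').1.getD k 0 =
      if k < n + 1 then
        PySem.Int.mod (B.getD k 0 + B.getD (k + 1) 0
          - PySem.List.pyGetD lc ((k : Int) + 1) 0) pvModulo
      else B.getD k 0 := by
  simp only [pvStepB, reduceIte]
  have := pv_ascend (fun j x y =>
      PySem.Int.mod (y + x - PySem.List.pyGetD lc (j + 1) 0) pvModulo) (0 : Int) (n + 1) B
    (by omega) k
  rw [show (((n + 1 : Nat)) : Int) = (n : Int) + 1 from by push_cast; ring] at this
  exact this

lemma pvStepB_other (n : Nat) (st : List Int × List Int × List Int) (c : Char)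
    (h1 : c ≠ '(') (h2 : c ≠ ')') : pvStepB n st c = st := by
  simp only [pvStepB, if_neg h1, if_neg h2]

lemma pvStepB_length (n : Nat) (st : List Int × List Int × List Int) (c : Char) :
    (pvStepB n st c).1.length = st.1.length := by
  simp only [pvStepB]
  split_ifs <;>
    simp only [pv_foldl_set_length (fun dp j =>
        PySem.Int.mod (PySem.List.pyGetD dp j 0 + PySem.List.pyGetD dp (j - 1) 0
          - PySem.List.pyGetD st.2.1 (j - 1) 0) pvModulo),
      pv_foldl_set_length (fun dp j =>
        PySem.Int.mod (PySem.List.pyGetD dp j 0 + PySem.List.pyGetD dp (j + 1) 0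
          - PySem.List.pyGetD st.2.2 (j + 1) 0) pvModulo)]

-- the coupling invariant: A's two counters per balance level, B's single counts plus snapshots
def PvInv (n : Nat) (A : List (Int × Int)) (B lo lc : List Int) : Prop :=
  A.length = n + 2 ∧ B.length = n + 2 ∧
  (A.getD 0 (0, 0)).1 = 1 ∧
  (∀ k : Nat, 0 ≤ (A.getD k (0, 0)).1 ∧ (A.getD k (0, 0)).1 < pvModulo ∧
              0 ≤ (A.getD k (0, 0)).2 ∧ (A.getD k (0, 0)).2 < pvModulo) ∧
  (∀ k : Nat, B.getD k 0 = PySem.Int.mod ((A.getD k (0, 0)).1 + (A.getD k (0, 0)).2) pvModulo) ∧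
  (∀ k : Nat, 1 ≤ k → k ≤ n + 1 → lo.getD (k - 1) 0 = (A.getD k (0, 0)).1) ∧
  (∀ k : Nat, k ≤ n → lc.getD (k + 1) 0 = (A.getD k (0, 0)).2)

lemma pv_mod_pos : (0 : Int) < pvModulo := by norm_num [pvModulo]

lemma pv_add_eq (u v : Int) (hu : 0 ≤ u) (hu' : u < pvModulo) (hv : 0 ≤ v) (hv' : v < pvModulo) :
    pvAdd u v = PySem.Int.mod (u + v) pvModulo := by
  rw [PySem.Int.mod_eq_emod_of_pos pv_mod_pos]
  simp only [pvAdd, pvModulo] at *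
  split_ifs <;> omega

lemma pv_add_bounds (u v : Int) (hu : 0 ≤ u) (hu' : u < pvModulo) (hv : 0 ≤ v) (hv' : v < pvModulo) :
    0 ≤ pvAdd u v ∧ pvAdd u v < pvModulo := by
  simp only [pvAdd, pvModulo] at *
  split_ifs <;> omega

lemma pv_arith_open (x y u v : Int) :
    PySem.Int.mod (PySem.Int.mod (x + y) pvModulo + PySem.Int.mod (u + v) pvModulo - x) pvModulo
      = PySem.Int.mod (pvAdd u v + y) pvModulo := by
  simp only [PySem.Int.mod_eq_emod_of_pos pv_mod_pos]
  simp only [pvAdd, pvModulo] at *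
  split_ifs <;> omega

lemma pv_arith_close (x y u v : Int) :
    PySem.Int.mod (PySem.Int.mod (x + y) pvModulo + PySem.Int.mod (u + v) pvModulo - y) pvModulo
      = PySem.Int.mod (x + pvAdd u v) pvModulo := by
  simp only [PySem.Int.mod_eq_emod_of_pos pv_mod_pos]
  simp only [pvAdd, pvModulo] at *
  split_ifs <;> omega

lemma pv_step_pres (n : Nat) (A : List (Int × Int)) (B lo lc : List Int) (c : Char)
    (hInv : PvInv n A B lo lc) :
    PvInv n (pvStepA n A c) (pvStepB n (B, lo, lc) c).1
      (pvStepB n (B, lo, lc) c).2.1 (pvStepB n (B, lo, lc) c).2.2 := by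
  obtain ⟨hA, hB, hA0, hbd, hI3, hI4, hI5⟩ := hInv
  by_cases hc1 : c = '('
  · subst hc1
    have hAop := pvStepA_open n A (by omega)
    have hBop := pvStepB_open_getD n B lo lc (by omega)
    have h2 : (pvStepB n (B, lo, lc) '(').2 = (B, lc) := rfl
    refine ⟨by rw [pvStepA_length]; omega, by rw [pvStepB_length]; omega, ?_, ?_, ?_, ?_, ?_⟩
    · rw [hAop 0, if_neg (by omega)]; exact hA0
    · intro k
      rw [hAop k]
      split_ifs with h
      · exact ⟨(pv_add_bounds _ _ (hbd (k-1)).1 (hbd (k-1)).2.1 (hbd (k-1)).2.2.1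
          (hbd (k-1)).2.2.2).1,
          (pv_add_bounds _ _ (hbd (k-1)).1 (hbd (k-1)).2.1 (hbd (k-1)).2.2.1
          (hbd (k-1)).2.2.2).2, (hbd k).2.2.1, (hbd k).2.2.2⟩
      · exact hbd k
    · intro k
      rw [hAop k, hBop k]
      split_ifs with h
      · have hcast : ((k : Int) - 1) = ((k - 1 : Nat) : Int) := by omega
        rw [hcast, PySem.List.pyGetD_natCast, hI4 k h.1 h.2, hI3 k, hI3 (k - 1)]
        exact pv_arith_open _ _ _ _
      · exact hI3 k
    · intro k hk1 hk2
      rw [h2]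
      simp only
      rw [hI3 (k - 1), hAop k, if_pos ⟨hk1, hk2⟩]
      exact (pv_add_eq _ _ (hbd (k-1)).1 (hbd (k-1)).2.1 (hbd (k-1)).2.2.1 (hbd (k-1)).2.2.2).symm
    · intro k hk
      rw [h2]
      simp only
      rw [hI5 k hk, hAop k]
      split_ifs <;> rfl
  · by_cases hc2 : c = ')'
    · subst hc2
      have hAop := pvStepA_close n A (by omega)
      have hBop := pvStepB_close_getD n B lo lc (by omega)
      have h2 : (pvStepB n (B, lo, lc) ')').2 = (lo, B) := rfl
      refine ⟨by rw [pvStepA_length]; omega, by rw [pvStepB_length]; omega, ?_, ?_, ?_, ?_, ?_⟩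
      · rw [hAop 0, if_pos (by omega)]; exact hA0
      · intro k
        rw [hAop k]
        split_ifs with h
        · exact ⟨(hbd k).1, (hbd k).2.1,
            (pv_add_bounds _ _ (hbd (k+1)).1 (hbd (k+1)).2.1 (hbd (k+1)).2.2.1
              (hbd (k+1)).2.2.2).1,
            (pv_add_bounds _ _ (hbd (k+1)).1 (hbd (k+1)).2.1 (hbd (k+1)).2.2.1
              (hbd (k+1)).2.2.2).2⟩
        · exact hbd k
      · intro k
        rw [hAop k, hBop k]
        split_ifs with h
        · have hcast : ((k : Int) + 1) = ((k + 1 : Nat) : Int) := by omega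
          rw [hcast, PySem.List.pyGetD_natCast, hI5 k (by omega), hI3 k, hI3 (k + 1)]
          exact pv_arith_close _ _ _ _
        · exact hI3 k
      · intro k hk1 hk2
        rw [h2]
        simp only
        rw [hI4 k hk1 hk2, hAop k]
        split_ifs <;> rfl
      · intro k hk
        rw [h2]
        simp only
        rw [hI3 (k + 1), hAop k, if_pos (by omega)]
        exact (pv_add_eq _ _ (hbd (k+1)).1 (hbd (k+1)).2.1 (hbd (k+1)).2.2.1
          (hbd (k+1)).2.2.2).symm
    · rw [pvStepA_other n A c hc1 hc2, pvStepB_other n (B, lo, lc) c hc1 hc2]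
      exact ⟨hA, hB, hA0, hbd, hI3, hI4, hI5⟩

lemma pv_fold (n : Nat) : ∀ (cs : List Char) (A : List (Int × Int)) (B lo lc : List Int),
    PvInv n A B lo lc →
    PvInv n (cs.foldl (pvStepA n) A) ((cs.foldl (pvStepB n) (B, lo, lc)).1)
      ((cs.foldl (pvStepB n) (B, lo, lc)).2.1) ((cs.foldl (pvStepB n) (B, lo, lc)).2.2) := by
  intro cs
  induction cs with
  | nil => intro A B lo lc h; exact h
  | cons c cs ih =>
    intro A B lo lc h
    simp only [List.foldl_cons]
    exact ih _ _ _ _ (pv_step_pres n A B lo lc c h)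

lemma pv_init (n : Nat) :
    PvInv n (PySem.List.pySetD (List.replicate (n + 2) ((0 : Int), (0 : Int))) 0 (1, 0))
      (PySem.List.pySetD (List.replicate (n + 2) (0 : Int)) 0 1)
      (List.replicate (n + 2) (0 : Int)) (List.replicate (n + 2) (0 : Int)) := by
  have e1 : PySem.List.pySetD (List.replicate (n + 2) ((0 : Int), (0 : Int))) 0 ((1 : Int), (0 : Int))
      = (List.replicate (n + 2) ((0 : Int), (0 : Int))).set (0 : Int).toNat (1, 0) :=
    PySem.List.pySetD_of_nonneg _ _ (by norm_num)
  have e2 : PySem.List.pySetD (List.replicate (n + 2) (0 : Int)) 0 1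
      = (List.replicate (n + 2) (0 : Int)).set (0 : Int).toNat 1 :=
    PySem.List.pySetD_of_nonneg _ _ (by norm_num)
  rw [e1, e2]
  have hA : ∀ k : Nat, (((List.replicate (n + 2) ((0 : Int), (0 : Int))).set (0:Int).toNat
      (1, 0)).getD k (0, 0)) = if k = 0 then ((1 : Int), (0 : Int)) else (0, 0) := by
    intro k
    rw [pv_getD_set]
    split_ifs with h1 h2 <;> simp_all
  have hB : ∀ k : Nat, (((List.replicate (n + 2) (0 : Int)).set (0:Int).toNat 1).getD k 0)
      = if k = 0 then (1 : Int) else 0 := by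
    intro k
    rw [pv_getD_set]
    split_ifs with h1 h2 <;> simp_all
  have hmod0 : PySem.Int.mod 0 pvModulo = 0 := by
    rw [PySem.Int.mod_eq_emod_of_pos pv_mod_pos]; simp
  have hmod1 : PySem.Int.mod 1 pvModulo = 1 := by
    rw [PySem.Int.mod_eq_emod_of_pos pv_mod_pos]
    norm_num [pvModulo]
  refine ⟨by simp, by simp, ?_, ?_, ?_, ?_, ?_⟩
  · rw [hA 0]; simp
  · intro k; rw [hA k]; split_ifs <;> norm_num [pvModulo]
  · intro k
    rw [hA k, hB k]
    split_ifs <;> simp [hmod0, hmod1]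
  · intro k hk1 _
    rw [pv_getD_replicate, hA k, if_neg (by omega)]
  · intro k _
    rw [pv_getD_replicate, hA k]
    split_ifs <;> rfl

lemma pv_final (v : Int) (h0 : 0 ≤ v) (h1 : v < pvModulo) :
    PySem.Int.mod (PySem.Int.mod (1 + v) pvModulo - 1) pvModulo = v := by
  simp only [PySem.Int.mod_eq_emod_of_pos pv_mod_pos]
  simp only [pvModulo] at *
  omega

theorem pv_main_eq (s : String) : count s = count_alt s := by
  simp only [count, count_alt]
  rw [PySem.List.foldl_pyRange_zero_pyGetD' s.toList ' ' (pvStepA s.toList.length)]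
  have h := pv_fold s.toList.length s.toList _ _ _ _ (pv_init s.toList.length)
  obtain ⟨hA, hB, hA0, hbd, hI3, _, _⟩ := h
  rw [PySem.List.pyGetD_zero, PySem.List.pyGetD_zero, hI3 0, hA0]
  exact (pv_final _ (hbd 0).2.2.1 (hbd 0).2.2.2).symm

-- ===== VERDICT (by name: the statement is the Claim_ definition above) =====
theorem count_spec : Claim_equal_count := by
  intro s _
  unfold Spec_count
  exact pv_main_eq s
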